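-- pv_equiv track=rewrite | github.com/riseatlsu/rose-2026-survival | scripts/12_inflow.py | get_number_of_weeks
-- ===== SOURCE A (Python) =====
-- def get_number_of_weeks(weekly_series):
--     weekly_max = None
--     weekly_min = None
--
--     for series in weekly_series.values():
--         if series:
--             for date in series.keys():
--                 if weekly_min is None or date < weekly_min:
--                     weekly_min = date
--                 if weekly_max is None or date > weekly_max:
--                     weekly_max = date
--
--     return weekly_min, weekly_max
-- ===== SOURCE B (Python) =====
-- def get_number_of_weeks(weekly_series):
--     dates = [d for series in weekly_series.values() for d in series]
--     if dates:
--         return min(dates), max(dates)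
--     return None, None
-- ===== Notes on version B (the rewrite author's own statement) =====
-- stated objective: simpler
-- what changed: Replaces the interleaved min/max-tracking nested loop over optional state with a flattening comprehension followed by the builtin min and max over the materialized date list.
import Mathlib
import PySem

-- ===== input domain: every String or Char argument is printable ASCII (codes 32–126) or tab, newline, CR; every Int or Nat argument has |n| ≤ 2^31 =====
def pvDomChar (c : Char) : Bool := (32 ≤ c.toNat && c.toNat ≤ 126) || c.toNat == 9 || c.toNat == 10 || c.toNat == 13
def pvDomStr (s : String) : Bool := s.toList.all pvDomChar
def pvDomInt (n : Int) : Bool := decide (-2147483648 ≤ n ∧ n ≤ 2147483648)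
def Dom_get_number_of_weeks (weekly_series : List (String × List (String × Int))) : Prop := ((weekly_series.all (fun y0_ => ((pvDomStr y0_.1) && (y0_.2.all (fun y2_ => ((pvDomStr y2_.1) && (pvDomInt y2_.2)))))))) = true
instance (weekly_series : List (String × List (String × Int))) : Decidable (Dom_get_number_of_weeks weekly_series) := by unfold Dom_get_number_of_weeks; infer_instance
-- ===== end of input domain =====

-- B replaces A's interleaved min/max-tracking nested loop with flatten-then-builtin-min/max; objective: simpler.

-- ===== PORT A =====
-- one step of A's inner loop body: update (weekly_min, weekly_max) with one date
def pvStepA (acc : Option String × Option String) (date : String) : Option String × Option String :=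
  ( (match acc.1 with
     | none => some date
     | some m => if date < m then some date else some m),
    (match acc.2 with
     | none => some date
     | some M => if date > M then some date else some M) )

def get_number_of_weeks (weekly_series : List (String × List (String × Int))) : Option String × Option String :=
  weekly_series.foldl
    (fun acc kv =>
      if kv.2 ≠ [] then
        kv.2.foldl (fun acc2 dkv => pvStepA acc2 dkv.1) acc
      else acc)
    (none, none)

-- ===== PORT B =====
def get_number_of_weeks_alt (weekly_series : List (String × List (String × Int))) : Option String × Option String :=
  let dates := weekly_series.flatMap (fun s => s.2.map Prod.fst)
  if dates ≠ [] then
    (PySem.List.min? dates (fun x => x), PySem.List.max? dates (fun x => x))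
  else (none, none)

-- ===== PRECONDITION & SPEC =====
def Spec_get_number_of_weeks (weekly_series : List (String × List (String × Int))) (out : Option String × Option String) : Prop := out = get_number_of_weeks_alt weekly_series
instance (weekly_series : List (String × List (String × Int))) (out : Option String × Option String) : Decidable (Spec_get_number_of_weeks weekly_series out) := by unfold Spec_get_number_of_weeks; infer_instance

-- ===== CLAIM =====
def Claim_equal_get_number_of_weeks : Prop := ∀ (weekly_series : List (String × List (String × Int))), Dom_get_number_of_weeks weekly_series → Spec_get_number_of_weeks weekly_series (get_number_of_weeks weekly_series)

-- ===== LEMMAS AND PROOFS =====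

-- A's double loop equals the single loop over the flattened date list (the `if series:` guard is redundant).
theorem loopA_eq_flat (ws : List (String × List (String × Int))) (acc : Option String × Option String) :
    ws.foldl
      (fun acc kv =>
        if kv.2 ≠ [] then
          kv.2.foldl (fun acc2 dkv => pvStepA acc2 dkv.1) acc
        else acc)
      acc
    = (ws.flatMap (fun s => s.2.map Prod.fst)).foldl pvStepA acc := by
  induction ws generalizing acc with
  | nil => simp
  | cons h t ih =>
    simp only [List.foldl_cons, List.flatMap_cons, List.foldl_append, List.foldl_map]
    have hguard : (if h.2 ≠ [] then h.2.foldl (fun acc2 dkv => pvStepA acc2 dkv.1) acc else acc)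
        = h.2.foldl (fun acc2 dkv => pvStepA acc2 dkv.1) acc := by
      rcases h.2 with _ | _ <;> simp
    rw [hguard, ih]

-- from a `some`/`some` state the loop is the running min/max fold
theorem loopA_some (l : List String) (m M : String) :
    l.foldl pvStepA (some m, some M) = (some (l.foldl min m), some (l.foldl max M)) := by
  induction l generalizing m M with
  | nil => simp
  | cons d t ih =>
    simp only [List.foldl_cons, pvStepA]
    have hmin : (if d < m then some d else some m) = some (min m d) := by
      rw [min_def]; by_cases h : d < m
      · simp [h, not_le.mpr h]
      · simp [h, not_lt.mp h]
    have hmax : (if d > M then some d else some M) = some (max M d) := by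
      rw [max_def]; by_cases h : M < d
      · simp [h, le_of_lt h]
      · by_cases h2 : M ≤ d
        · have : d = M := le_antisymm (not_lt.mp h) h2
          simp [this]
        · simp [h, h2]
    simp only [hmin, hmax]
    exact ih (min m d) (max M d)

theorem flat_fold_eq (l : List String) :
    l.foldl pvStepA (none, none)
      = if l ≠ [] then (PySem.List.min? l (fun x => x), PySem.List.max? l (fun x => x)) else (none, none) := by
  cases l with
  | nil => simp
  | cons x t =>
    have h0 : pvStepA (none, none) x = (some x, some x) := by simp [pvStepA]
    simp only [List.foldl_cons, h0, loopA_some, ne_eq, reduceCtorEq, not_false_iff, if_true,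
      PySem.List.min?_id_cons, PySem.List.max?_id_cons]

-- ===== VERDICT =====
theorem get_number_of_weeks_spec : Claim_equal_get_number_of_weeks := by
  intro ws _
  unfold Spec_get_number_of_weeks get_number_of_weeks get_number_of_weeks_alt
  rw [loopA_eq_flat, flat_fold_eq]
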